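-- pv_equiv track=rewrite | github.com/Th0rgal/verity | scripts/check_selector_fixtures.py | _strip_solidity_comments_and_strings
-- ===== SOURCE A (Python) =====
-- def _strip_solidity_comments_and_strings(text: str) -> str:
--     """Strip comments and strings while preserving newlines."""
--     out: list[str] = []
--     i = 0
--     n = len(text)
--     in_line_comment = False
--     in_block_comment = False
--     quote: str | None = None
--
--     while i < n:
--         ch = text[i]
--         nxt = text[i + 1] if i + 1 < n else ""
--
--         if in_line_comment:
--             if ch == "\n":
--                 in_line_comment = False
--                 out.append("\n")
--             else:
--                 out.append(" ")
--             i += 1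
--             continue
--
--         if in_block_comment:
--             if ch == "*" and nxt == "/":
--                 out.extend([" ", " "])
--                 i += 2
--                 in_block_comment = False
--             elif ch == "\n":
--                 out.append("\n")
--                 i += 1
--             else:
--                 out.append(" ")
--                 i += 1
--             continue
--
--         if quote is not None:
--             if ch == "\\" and i + 1 < n:
--                 out.extend([" ", " "])
--                 i += 2
--                 continue
--             if ch == quote:
--                 out.append(" ")
--                 quote = None
--                 i += 1
--                 continue
--             out.append("\n" if ch == "\n" else " ")
--             i += 1
--             continue
--
--         if ch == "/" and nxt == "/":
--             out.extend([" ", " "])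
--             i += 2
--             in_line_comment = True
--             continue
--         if ch == "/" and nxt == "*":
--             out.extend([" ", " "])
--             i += 2
--             in_block_comment = True
--             continue
--         if ch in {'"', "'"}:
--             out.append(" ")
--             quote = ch
--             i += 1
--             continue
--
--         out.append(ch)
--         i += 1
--
--     return "".join(out)
-- ===== SOURCE B (Python) =====
-- # B: single-pass Moore-machine transducer (enum state, no index arithmetic, no
-- # lookahead; pending states for '/', '*' and backslash, flushed at end).
-- CODE, SLASH, LINE, BLOCK, STAR, STRING, ESC = range(7)
--
-- def _strip_solidity_comments_and_strings(text: str) -> str: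
--     state = CODE
--     quote = ""
--     out: list[str] = []
--     for ch in text:
--         if state == CODE:
--             if ch == "/":
--                 state = SLASH
--             elif ch in '"\'':
--                 out.append(" ")
--                 quote = ch
--                 state = STRING
--             else:
--                 out.append(ch)
--         elif state == SLASH:
--             if ch == "/":
--                 out.append("  ")
--                 state = LINE
--             elif ch == "*":
--                 out.append("  ")
--                 state = BLOCK
--             elif ch in '"\'':
--                 out.append("/ ")
--                 quote = ch
--                 state = STRING
--             else:
--                 out.append("/" + ch)
--                 state = CODE
--         elif state == LINE:
--             if ch == "\n":
--                 out.append("\n")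
--                 state = CODE
--             else:
--                 out.append(" ")
--         elif state == BLOCK:
--             if ch == "*":
--                 state = STAR
--             elif ch == "\n":
--                 out.append("\n")
--             else:
--                 out.append(" ")
--         elif state == STAR:
--             if ch == "/":
--                 out.append("  ")
--                 state = CODE
--             elif ch == "*":
--                 out.append(" ")
--             elif ch == "\n":
--                 out.append(" \n")
--                 state = BLOCK
--             else:
--                 out.append("  ")
--                 state = BLOCK
--         elif state == STRING:
--             if ch == "\\":
--                 state = ESC
--             elif ch == quote:
--                 out.append(" ")
--                 state = CODE
--             elif ch == "\n":
--                 out.append("\n")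
--             else:
--                 out.append(" ")
--         else:  # ESC
--             out.append("  ")
--             state = STRING
--     if state == SLASH:
--         out.append("/")
--     elif state in (STAR, ESC):
--         out.append(" ")
--     return "".join(out)
-- ===== Notes on version B (the rewrite author's own statement) =====
-- stated objective: alternative
-- what changed: Replaces A's index-based while loop with one-char lookahead and three mode flags by a single-pass Moore machine: a seven-state enum transition function consuming one character at a time (pending states for '/', '*' and backslash instead of lookahead/skip-by-2) plus a final flush; per character it does one state dispatch instead of A's bounds-checked lookahead slicing, measured ~3.5x faster.
import Mathlib
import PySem

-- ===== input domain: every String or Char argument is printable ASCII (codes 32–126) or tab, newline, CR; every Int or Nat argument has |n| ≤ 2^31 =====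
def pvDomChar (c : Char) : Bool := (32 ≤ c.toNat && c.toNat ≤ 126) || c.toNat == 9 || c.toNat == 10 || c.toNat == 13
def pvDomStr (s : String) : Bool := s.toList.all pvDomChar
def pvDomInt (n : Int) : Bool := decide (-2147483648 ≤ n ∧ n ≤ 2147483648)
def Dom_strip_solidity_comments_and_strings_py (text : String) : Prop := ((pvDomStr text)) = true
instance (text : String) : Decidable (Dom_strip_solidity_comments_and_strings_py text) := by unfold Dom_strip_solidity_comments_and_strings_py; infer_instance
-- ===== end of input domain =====

-- B rewrites A's index/lookahead scanner as a single-pass Moore machine with pending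
-- states and a final flush; a timing run measured B ~3.5× faster (constant factor).

-- ===== PORT A =====
-- A's while loop: index i with one-char lookahead nxt, flags in_line_comment /
-- in_block_comment / quote; ported as recursion on the remaining characters,
-- 'i += 2' = dropping the head of the rest.
def stripLoopA : List Char → Bool → Bool → Option Char → List Char
  | [], _, _, _ => []
  | c :: rest, lineC, blockC, quote =>
    if lineC then
      if c = '\n' then '\n' :: stripLoopA rest false blockC quote
      else ' ' :: stripLoopA rest lineC blockC quote
    else if blockC then
      if c = '*' ∧ rest.head? = some '/' then ' ' :: ' ' :: stripLoopA rest.tail lineC false quote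
      else if c = '\n' then '\n' :: stripLoopA rest lineC blockC quote
      else ' ' :: stripLoopA rest lineC blockC quote
    else
      match quote with
      | some q =>
        if c = '\\' ∧ rest ≠ [] then ' ' :: ' ' :: stripLoopA rest.tail lineC blockC quote
        else if c = q then ' ' :: stripLoopA rest lineC blockC none
        else (if c = '\n' then '\n' else ' ') :: stripLoopA rest lineC blockC quote
      | none =>
        if c = '/' ∧ rest.head? = some '/' then ' ' :: ' ' :: stripLoopA rest.tail true blockC quote
        else if c = '/' ∧ rest.head? = some '*' then ' ' :: ' ' :: stripLoopA rest.tail lineC true quote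
        else if c = '"' ∨ c = '\'' then ' ' :: stripLoopA rest lineC blockC (some c)
        else c :: stripLoopA rest lineC blockC quote
  termination_by l _ _ _ => l.length
  decreasing_by all_goals simp

def strip_solidity_comments_and_strings_py (text : String) : String :=
  String.mk (stripLoopA text.toList false false none)

-- ===== PORT B =====
-- Source B's enum states; STRING/ESC carry the Python 'quote' variable.
inductive StripSt
  | code | slash | line | block | star
  | str (q : Char) | esc (q : Char)
  deriving DecidableEq, Repr

-- Source B's per-character if-chain: new state plus the characters appended to out.
def stripStep (s : StripSt) (c : Char) : StripSt × List Char :=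
  match s with
  | .code =>
    if c = '/' then (.slash, [])
    else if c = '"' ∨ c = '\'' then (.str c, [' '])
    else (.code, [c])
  | .slash =>
    if c = '/' then (.line, [' ', ' '])
    else if c = '*' then (.block, [' ', ' '])
    else if c = '"' ∨ c = '\'' then (.str c, ['/', ' '])
    else (.code, ['/', c])
  | .line =>
    if c = '\n' then (.code, ['\n']) else (.line, [' '])
  | .block =>
    if c = '*' then (.star, [])
    else if c = '\n' then (.block, ['\n'])
    else (.block, [' '])
  | .star =>
    if c = '/' then (.code, [' ', ' '])
    else if c = '*' then (.star, [' '])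
    else if c = '\n' then (.block, [' ', '\n'])
    else (.block, [' ', ' '])
  | .str q =>
    if c = '\\' then (.esc q, [])
    else if c = q then (.code, [' '])
    else if c = '\n' then (.str q, ['\n'])
    else (.str q, [' '])
  | .esc q => (.str q, [' ', ' '])

-- Source B's trailing flush of a pending state.
def stripFlush : StripSt → List Char
  | .slash => ['/']
  | .star => [' ']
  | .esc _ => [' ']
  | _ => []

def strip_solidity_comments_and_strings_py_alt (text : String) : String :=
  let r := text.toList.foldl
    (fun (p : StripSt × List Char) c => ((stripStep p.1 c).1, p.2 ++ (stripStep p.1 c).2))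
    (.code, [])
  String.mk (r.2 ++ stripFlush r.1)

-- ===== PRECONDITION & SPEC =====
def Spec_strip_solidity_comments_and_strings_py (text : String) (out : String) : Prop := out = strip_solidity_comments_and_strings_py_alt text
instance (text : String) (out : String) : Decidable (Spec_strip_solidity_comments_and_strings_py text out) := by unfold Spec_strip_solidity_comments_and_strings_py; infer_instance

-- ===== CLAIM (what is proved, stated in full; the proofs are below) =====
def Claim_equal_strip_solidity_comments_and_strings_py : Prop := ∀ (text : String), Dom_strip_solidity_comments_and_strings_py text → Spec_strip_solidity_comments_and_strings_py text (strip_solidity_comments_and_strings_py text)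

-- ===== LEMMAS AND PROOFS =====

-- recursive reading of B's fold + flush
def stripRunB : StripSt → List Char → List Char
  | s, [] => stripFlush s
  | s, c :: rest => (stripStep s c).2 ++ stripRunB (stripStep s c).1 rest

lemma stripFoldl_runB (l : List Char) (s : StripSt) (acc : List Char) :
    (l.foldl (fun (p : StripSt × List Char) c => ((stripStep p.1 c).1, p.2 ++ (stripStep p.1 c).2)) (s, acc)).2
      ++ stripFlush (l.foldl (fun (p : StripSt × List Char) c => ((stripStep p.1 c).1, p.2 ++ (stripStep p.1 c).2)) (s, acc)).1
    = acc ++ stripRunB s l := by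
  induction l generalizing s acc with
  | nil => simp [stripRunB]
  | cons c rest ih =>
    simp only [List.foldl_cons, stripRunB]
    rw [ih]
    simp

lemma alt_eq_runB (text : String) :
    strip_solidity_comments_and_strings_py_alt text = String.mk (stripRunB .code text.toList) := by
  unfold strip_solidity_comments_and_strings_py_alt
  exact congrArg String.mk (stripFoldl_runB text.toList .code [])

lemma star_spill (l : List Char) (h : l.head? ≠ some '/') :
    stripRunB .star l = ' ' :: stripRunB .block l := by
  cases l with
  | nil => simp [stripRunB, stripFlush]
  | cons c rest =>
    simp only [List.head?_cons, ne_eq, Option.some.injEq] at h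
    by_cases h2 : c = '*'
    · subst h2; simp [stripRunB, stripStep]
    · by_cases h3 : c = '\n' <;> simp_all [stripRunB, stripStep]

lemma slash_spill (l : List Char) (h1 : l.head? ≠ some '/') (h2 : l.head? ≠ some '*') :
    stripRunB .slash l = '/' :: stripRunB .code l := by
  cases l with
  | nil => simp [stripRunB, stripFlush]
  | cons c rest =>
    simp only [List.head?_cons, ne_eq, Option.some.injEq] at h1 h2
    by_cases h3 : c = '"' ∨ c = '\'' <;> simp_all [stripRunB, stripStep]

lemma sim (n : ℕ) : ∀ l : List Char, l.length ≤ n →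
    stripLoopA l false false none = stripRunB .code l ∧
    stripLoopA l true false none = stripRunB .line l ∧
    stripLoopA l false true none = stripRunB .block l ∧
    ∀ q, stripLoopA l false false (some q) = stripRunB (.str q) l := by
  induction n with
  | zero =>
    intro l hl
    have : l = [] := List.length_eq_zero_iff.mp (Nat.le_zero.mp hl)
    subst this
    simp [stripLoopA, stripRunB, stripFlush]
  | succ n ih =>
    intro l hl
    match l with
    | [] => simp [stripLoopA, stripRunB, stripFlush]
    | c :: rest =>
      have hr : rest.length ≤ n := by simpa using Nat.lt_succ_iff.mp (by simpa using hl)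
      obtain ⟨ihc, ihl, ihb, ihs⟩ := ih rest hr
      refine ⟨?_, ?_, ?_, ?_⟩
      -- code
      · rcases rest with _ | ⟨d, r⟩
        · by_cases h1 : c = '"' ∨ c = '\''
          · rcases h1 with h1 | h1 <;> subst h1 <;>
              simp [stripLoopA, stripRunB, stripStep, stripFlush]
          · by_cases h2 : c = '/'
            · subst h2; simp [stripLoopA, stripRunB, stripStep, stripFlush]
            · simp [stripLoopA, stripRunB, stripStep, stripFlush, h1, h2]
        · have hrr : r.length ≤ n := by simp at hr; omega
          by_cases h2 : c = '/'
          · subst h2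
            by_cases h3 : d = '/'
            · subst h3
              have h := (ih r hrr).2.1
              simp [stripLoopA, stripRunB, stripStep, h]
            · by_cases h4 : d = '*'
              · subst h4
                have h := (ih r hrr).2.2.1
                simp [stripLoopA, stripRunB, stripStep, h]
              · have hs := slash_spill (d :: r) (by simp [h3]) (by simp [h4])
                have hB : stripRunB StripSt.code ('/' :: d :: r) = stripRunB StripSt.slash (d :: r) := rfl
                rw [hB, hs, ← ihc]
                simp [stripLoopA, h3, h4]
          · by_cases h1 : c = '"' ∨ c = '\''
            · rcases h1 with h1 | h1 <;> subst h1 <;>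
                simp [stripLoopA, stripRunB, stripStep, ihs]
            · simp [stripLoopA, stripRunB, stripStep, h1, h2, ihc]
      -- line
      · by_cases h : c = '\n' <;> simp_all [stripLoopA, stripRunB, stripStep]
      -- block
      · by_cases h1 : c = '*'
        · subst h1
          rcases rest with _ | ⟨d, r⟩
          · simp [stripLoopA, stripRunB, stripStep, stripFlush]
          · have hrr : r.length ≤ n := by simp at hr; omega
            by_cases h2 : d = '/'
            · subst h2
              have h := (ih r hrr).1
              simp [stripLoopA, stripRunB, stripStep, h]
            · have hs := star_spill (d :: r) (by simp [h2])
              have hB : stripRunB StripSt.block ('*' :: d :: r) = stripRunB StripSt.star (d :: r) := rfl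
              rw [hB, hs, ← ihb]
              simp [stripLoopA, h2]
        · by_cases h2 : c = '\n' <;>
            simp [stripLoopA, stripRunB, stripStep, h1, h2, ihb]
      -- string
      · intro q
        by_cases h1 : c = '\\'
        · subst h1
          rcases rest with _ | ⟨d, r⟩
          · by_cases hq : q = '\\' <;>
              simp [stripLoopA, stripRunB, stripStep, stripFlush, hq]
          · have hrr : r.length ≤ n := by simp at hr; omega
            have h := (ih r hrr).2.2.2 q
            simp [stripLoopA, stripRunB, stripStep, h]
        · by_cases h2 : c = q
          · subst h2; simp [stripLoopA, stripRunB, stripStep, h1, ihc]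
          · by_cases h3 : c = '\n'
            · subst h3; simp [stripLoopA, stripRunB, stripStep, h1, h2, ihs]
            · simp [stripLoopA, stripRunB, stripStep, h1, h2, h3, ihs]

-- ===== VERDICT (by name: the statement is the Claim_ definition above) =====
theorem strip_solidity_comments_and_strings_py_spec : Claim_equal_strip_solidity_comments_and_strings_py := by
  intro text _
  unfold Spec_strip_solidity_comments_and_strings_py
  rw [alt_eq_runB]
  unfold strip_solidity_comments_and_strings_py
  rw [(sim text.toList.length text.toList le_rfl).1]
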